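-- pv_equiv track=rewrite | github.com/TNKhiem/Code_python | Chon_khoi.py | tuvan
-- ===== SOURCE A (Python) =====
-- def tuvan(A,B,C,D):
--     dsKhoi=[]
--     khoi=[A,B,C,D]
--     M=max(khoi)
--     for i in range(4):
--         if khoi[i]==M:
--             dsKhoi.append(i)
--     return dsKhoi
-- ===== SOURCE B (Python) =====
-- def tuvan(A, B, C, D):
--     vals = [A, B, C, D]
--     cur = vals[0]
--     ds = [0]
--     for i in range(1, 4):
--         if vals[i] > cur:
--             cur = vals[i]
--             ds = [i]
--         elif vals[i] == cur:
--             ds.append(i)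
--     return ds
-- ===== Notes on version B (the rewrite author's own statement) =====
-- stated objective: alternative
-- what changed: Single pass with a running maximum and an index list that is reset on a new max, instead of computing max() first and then filtering indices in a second pass.
import Mathlib
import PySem

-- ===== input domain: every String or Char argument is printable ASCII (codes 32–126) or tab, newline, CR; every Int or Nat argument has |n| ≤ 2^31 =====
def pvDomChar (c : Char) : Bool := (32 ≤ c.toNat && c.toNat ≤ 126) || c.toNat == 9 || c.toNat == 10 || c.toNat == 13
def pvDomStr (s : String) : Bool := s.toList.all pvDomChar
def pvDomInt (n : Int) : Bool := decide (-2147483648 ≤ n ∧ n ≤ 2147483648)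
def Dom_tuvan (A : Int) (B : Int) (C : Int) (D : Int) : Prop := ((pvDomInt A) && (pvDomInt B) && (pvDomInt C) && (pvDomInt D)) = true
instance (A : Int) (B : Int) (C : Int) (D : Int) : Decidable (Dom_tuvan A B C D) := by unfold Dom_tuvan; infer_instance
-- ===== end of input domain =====

-- B replaces A's max-then-filter two-pass with a single pass keeping a running maximum and an index list reset on a new maximum (alternative decomposition, same cost).


-- ===== PORT A =====
-- max(khoi): khoi is the literal nonempty list [A,B,C,D], so max? is always some; .getD 0 only unwraps it.
def tuvan (A : Int) (B : Int) (C : Int) (D : Int) : List Int :=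
  let dsKhoi : List Int := []
  let khoi : List Int := [A, B, C, D]
  let M : Int := (PySem.List.max? khoi (fun x => x)).getD 0
  (PySem.List.pyRange 0 4 1).foldl
    (fun ds i => if PySem.List.pyGetD khoi i 0 = M then ds ++ [i] else ds) dsKhoi

-- ===== PORT B =====
def tuvan_alt (A : Int) (B : Int) (C : Int) (D : Int) : List Int :=
  let vals : List Int := [A, B, C, D]
  let st :=
    (PySem.List.pyRange 1 4 1).foldl
      (fun (st : Int × List Int) i =>
        let v := PySem.List.pyGetD vals i 0
        if v > st.1 then (v, [i])
        else if v = st.1 then (st.1, st.2 ++ [i])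
        else st)
      (PySem.List.pyGetD vals 0 0, [0])
  st.2

-- ===== PRECONDITION & SPEC =====
def Spec_tuvan (A : Int) (B : Int) (C : Int) (D : Int) (out : List Int) : Prop := out = tuvan_alt A B C D
instance (A : Int) (B : Int) (C : Int) (D : Int) (out : List Int) : Decidable (Spec_tuvan A B C D out) := by unfold Spec_tuvan; infer_instance

-- ===== CLAIM (what is proved, stated in full; the proofs are below) =====
def Claim_equal_tuvan : Prop := ∀ (A : Int) (B : Int) (C : Int) (D : Int), Dom_tuvan A B C D → Spec_tuvan A B C D (tuvan A B C D)

-- ===== LEMMAS AND PROOFS =====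

-- B's loop body as a step function over (index, value) pairs (definitionally equal to tuvan_alt's body on the concrete list).
def pvStep (st : Int × List Int) (p : Int × Int) : Int × List Int :=
  if p.2 > st.1 then (p.2, [p.1]) else if p.2 = st.1 then (st.1, st.2 ++ [p.1]) else st

-- Loop invariant of B: the fold returns the running maximum and the indices where it occurs
-- (the seed indices ds survive exactly when no later value exceeds the seed c).
lemma pvLoop (l : List (Int × Int)) (c : Int) (ds : List Int) :
    l.foldl pvStep (c, ds) =
      (List.foldl (fun a p => max a p.2) c l,
       (if List.foldl (fun a p => max a p.2) c l ≤ c then ds else []) ++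
         (l.filter (fun p => p.2 = List.foldl (fun a p => max a p.2) c l)).map Prod.fst) := by
  induction l generalizing c ds with
  | nil => simp
  | cons p t ih =>
    have hle : max c p.2 ≤ List.foldl max (max c p.2) (t.map Prod.snd) :=
      (PySem.List.le_foldl_max _ _).1
    rw [List.foldl_map] at hle
    simp only [List.foldl_cons, pvStep, List.filter_cons]
    rcases lt_trichotomy c p.2 with h | h | h
    · have hmax : max c p.2 = p.2 := max_eq_right h.le
      rw [if_pos (by exact h), ih]
      simp only [hmax] at hle ⊢
      have hcle : ¬ List.foldl (fun a p => max a p.2) p.2 t ≤ c := by omega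
      by_cases h2 : List.foldl (fun a p => max a p.2) p.2 t ≤ p.2
      · have he : p.2 = List.foldl (fun a p => max a p.2) p.2 t := le_antisymm hle h2
        have hc2 : ¬ p.2 ≤ c := by omega
        simp [← he, hc2]
      · have hne : ¬ p.2 = List.foldl (fun a p => max a p.2) p.2 t := by omega
        simp [h2, hcle, hne]
    · have hmax : max c p.2 = c := by omega
      rw [if_neg (by omega), if_pos h.symm, ih]
      simp only [hmax] at hle ⊢
      by_cases h2 : List.foldl (fun a p => max a p.2) c t ≤ c
      · have he : p.2 = List.foldl (fun a p => max a p.2) c t := by omega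
        simp [h2, he]
      · have hne : ¬ p.2 = List.foldl (fun a p => max a p.2) c t := by omega
        simp [h2, hne]
    · have hmax : max c p.2 = c := by omega
      rw [if_neg (by omega), if_neg (by omega), ih]
      simp only [hmax] at hle ⊢
      have hne : ¬ p.2 = List.foldl (fun a p => max a p.2) c t := by omega
      simp [hne]

-- ===== VERDICT (by name: the statement is the Claim_ definition above) =====
theorem tuvan_spec : Claim_equal_tuvan := by
  intro A B C D _
  unfold Spec_tuvan tuvan tuvan_alt
  have hB : (let vals : List Int := [A, B, C, D]
      let st :=
        (PySem.List.pyRange 1 4 1).foldl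
          (fun (st : Int × List Int) i =>
            let v := PySem.List.pyGetD vals i 0
            if v > st.1 then (v, [i])
            else if v = st.1 then (st.1, st.2 ++ [i])
            else st)
          (PySem.List.pyGetD vals 0 0, [0])
      st.2) = (([(1,B),(2,C),(3,D)] : List (Int × Int)).foldl pvStep (A, [0])).2 := rfl
  rw [hB, pvLoop]
  rw [show PySem.List.pyRange 0 4 1 = [0,1,2,3] from by decide]
  simp only [PySem.List.max?_id_cons, List.foldl_cons, List.foldl_nil, Option.getD_some,
    List.filter_cons, List.filter_nil, decide_eq_true_eq,
    show ∀ x : Int, PySem.List.pyGetD [A,B,C,D] 0 x = A from fun _ => rfl,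
    show ∀ x : Int, PySem.List.pyGetD [A,B,C,D] 1 x = B from fun _ => rfl,
    show ∀ x : Int, PySem.List.pyGetD [A,B,C,D] 2 x = C from fun _ => rfl,
    show ∀ x : Int, PySem.List.pyGetD [A,B,C,D] 3 x = D from fun _ => rfl]
  split_ifs <;> first | rfl | (exfalso; omega)
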